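-- pv_equiv track=rewrite | github.com/kretatusha/practices_number_2 | subprefix/subpref.py | brutforce
-- ===== SOURCE A (Python) =====
-- from typing import List
--
-- def brutforce(words: List[str]):
--     max_length = 0
--     answer = []
--     for word1 in words:
--         for word2 in words:
--             if word1 == word2:
--                 continue
--             min_len = max_length
--             max_len = min(len(word2), len(word2))
--             for pref in range(max_len, min_len, -1):
--                 if word2.endswith(word1[:pref]):
--                     max_length = pref
--                     answer = [word1, word2]
--                     break
--     return max_length, answer
-- ===== SOURCE B (Python) =====
-- def _overlap(w1, w2):
--     # largest p in [0, len(w2)] such that w2 ends with w1[:p]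
--     best = 0
--     for p in range(1, len(w2) + 1):
--         if w2.endswith(w1[:p]):
--             best = p
--     return best
--
-- def brutforce(words):
--     cands = [(_overlap(w1, w2), [w1, w2])
--              for w1 in words for w2 in words if w1 != w2]
--     max_length, answer = 0, []
--     for length, pair in cands:
--         if length > max_length:
--             max_length, answer = length, pair
--     return max_length, answer
-- ===== Notes on version B (the rewrite author's own statement) =====
-- stated objective: alternative
-- what changed: Per pair the best overlap is computed by a single ascending last-match scan over all prefix lengths instead of A's descending break-scan whose lower bound is the global running maximum; all pair candidates are collected in one comprehension and the answer is picked by one final first-strict-maximum pass.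
import Mathlib
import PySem

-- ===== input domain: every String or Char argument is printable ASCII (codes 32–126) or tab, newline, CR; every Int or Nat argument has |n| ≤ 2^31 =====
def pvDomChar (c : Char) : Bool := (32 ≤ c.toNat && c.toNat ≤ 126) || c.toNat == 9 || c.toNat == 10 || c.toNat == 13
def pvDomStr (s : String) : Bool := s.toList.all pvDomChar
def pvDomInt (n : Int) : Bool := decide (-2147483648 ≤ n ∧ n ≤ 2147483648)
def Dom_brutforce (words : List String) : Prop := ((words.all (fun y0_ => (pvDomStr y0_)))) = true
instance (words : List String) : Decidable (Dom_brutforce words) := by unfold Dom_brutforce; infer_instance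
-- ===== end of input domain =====

-- B restructures A: per pair it computes the best overlap by one ascending last-match scan
-- (instead of A's descending break-scan whose lower bound is the running maximum), collects all
-- candidates in a comprehension and picks the first strict maximum in a single final pass
-- (objective: alternative; same return value everywhere).

-- ===== PORT A =====
-- A's inner `for pref in range(max_len, min_len, -1): … break` loop
def prefLoopA (word1 word2 : String) : List Int → Int × List String → Int × List String
  | [], st => st
  | pref :: ps, st =>
      if PySem.Str.endswith word2 (PySem.Str.slice word1 none (some pref)) then
        (pref, [word1, word2])
      else
        prefLoopA word1 word2 ps st

def brutforce (words : List String) : Int × List String :=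
  words.foldl (fun st word1 =>
    words.foldl (fun st word2 =>
      if word1 == word2 then st
      else
        let min_len := st.1
        let max_len := min (PySem.Str.len word2) (PySem.Str.len word2)
        prefLoopA word1 word2 (PySem.List.pyRange max_len min_len (-1)) st) st) (0, [])

-- ===== PORT B =====
-- B's `_overlap` helper: ascending scan keeping the last (largest) matching prefix length
def overlapB (w1 w2 : String) : Int :=
  (PySem.List.pyRange 1 (PySem.Str.len w2 + 1) 1).foldl
    (fun best p =>
      if PySem.Str.endswith w2 (PySem.Str.slice w1 none (some p)) then p else best) 0

def brutforce_alt (words : List String) : Int × List String :=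
  let cands := words.flatMap (fun w1 =>
    (words.filter (fun w2 => w1 != w2)).map (fun w2 => (overlapB w1 w2, [w1, w2])))
  cands.foldl (fun st c => if c.1 > st.1 then (c.1, c.2) else st) (0, [])

-- ===== PRECONDITION & SPEC =====
def Spec_brutforce (words : List String) (out : Int × List String) : Prop := out = brutforce_alt words
instance (words : List String) (out : Int × List String) : Decidable (Spec_brutforce words out) := by unfold Spec_brutforce; infer_instance

-- ===== CLAIM (what is proved, stated in full; the proofs are below) =====
def Claim_equal_brutforce : Prop := ∀ (words : List String), Dom_brutforce words → Spec_brutforce words (brutforce words)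

-- ===== LEMMAS AND PROOFS =====

-- overlapB with the range bound generalised to a natural number, for induction
def ovN (w1 w2 : String) (n : Nat) : Int :=
  (PySem.List.pyRange 1 ((n : Int) + 1) 1).foldl
    (fun best p =>
      if PySem.Str.endswith w2 (PySem.Str.slice w1 none (some p)) then p else best) 0

lemma overlapB_eq_ovN (w1 w2 : String) : overlapB w1 w2 = ovN w1 w2 w2.toList.length := by
  simp [overlapB, ovN]

lemma ovN_zero (w1 w2 : String) : ovN w1 w2 0 = 0 := by
  simp [ovN, PySem.List.pyRange_one_eq_nil (by omega : (1:Int) ≤ 1)]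

lemma ovN_succ (w1 w2 : String) (n : Nat) :
    ovN w1 w2 (n + 1) =
      if PySem.Str.endswith w2 (PySem.Str.slice w1 none (some ((n : Int) + 1))) then
        (n : Int) + 1
      else ovN w1 w2 n := by
  have hcast : (((n + 1 : Nat) : Int) + 1) = (((n : Int) + 1) + 1) := by push_cast; ring
  have hr : PySem.List.pyRange 1 (((n : Int) + 1) + 1) 1
      = PySem.List.pyRange 1 ((n : Int) + 1) 1 ++ [(n : Int) + 1] :=
    PySem.List.pyRange_one_succ_right (by omega)
  simp only [ovN, hcast, hr, List.foldl_append, List.foldl_cons, List.foldl_nil]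

lemma ovN_bounds (w1 w2 : String) (n : Nat) : 0 ≤ ovN w1 w2 n ∧ ovN w1 w2 n ≤ (n : Int) := by
  induction n with
  | zero => simp [ovN_zero]
  | succ k ih =>
      rw [ovN_succ]
      split
      · constructor <;> push_cast <;> omega
      · constructor
        · exact ih.1
        · have := ih.2; push_cast; omega

lemma overlapB_nonneg (w1 w2 : String) : 0 ≤ overlapB w1 w2 := by
  rw [overlapB_eq_ovN]; exact (ovN_bounds w1 w2 _).1

-- A's descending break-scan over range(n, m, -1) finds the maximal match,
-- i.e. B's ascending last-match value, whenever that beats the running maximum m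
lemma prefLoopA_eq (w1 w2 : String) (n : Nat) :
    ∀ (m : Int) (ans : List String), 0 ≤ m →
      prefLoopA w1 w2 (PySem.List.pyRange (n : Int) m (-1)) (m, ans)
        = if m < ovN w1 w2 n then (ovN w1 w2 n, [w1, w2]) else (m, ans) := by
  induction n with
  | zero =>
      intro m ans hm
      rw [PySem.List.pyRange_neg_one_eq_nil (by exact_mod_cast hm)]
      simp [prefLoopA, ovN_zero]
      omega
  | succ k ih =>
      intro m ans hm
      by_cases hlt : m < (k : Int) + 1
      · have hlt' : m < ((k + 1 : Nat) : Int) := by push_cast; omega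
        rw [PySem.List.pyRange_neg_one_cons hlt']
        have hsub : ((k + 1 : Nat) : Int) - 1 = (k : Int) := by push_cast; ring
        have hcast : ((k + 1 : Nat) : Int) = (k : Int) + 1 := by push_cast; ring
        rw [hsub, hcast, ovN_succ]
        simp only [prefLoopA]
        by_cases hq : PySem.Str.endswith w2 (PySem.Str.slice w1 none (some ((k : Int) + 1))) = true
        · rw [if_pos hq, if_pos hq, if_pos hlt]
        · rw [if_neg hq, if_neg hq]
          exact ih m ans hm
      · have hle : ((k + 1 : Nat) : Int) ≤ m := by push_cast; omega
        rw [PySem.List.pyRange_neg_one_eq_nil hle]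
        have := (ovN_bounds w1 w2 (k + 1)).2
        simp [prefLoopA]
        push_cast at this ⊢
        omega

-- B's candidate fold for one fixed w1, over the filtered-and-mapped list, equals A's inner fold
lemma inner_eq (w1 : String) (ws : List String) :
    ∀ (m : Int) (ans : List String), 0 ≤ m →
      ws.foldl (fun st word2 =>
          if w1 == word2 then st
          else
            let min_len := st.1
            let max_len := min (PySem.Str.len word2) (PySem.Str.len word2)
            prefLoopA w1 word2 (PySem.List.pyRange max_len min_len (-1)) st) (m, ans)
      = ((ws.filter (fun w2 => w1 != w2)).map (fun w2 => (overlapB w1 w2, [w1, w2]))).foldl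
          (fun st c => if c.1 > st.1 then (c.1, c.2) else st) (m, ans) := by
  induction ws with
  | nil => intro m ans hm; simp
  | cons w2 rest ih =>
      intro m ans hm
      simp only [List.foldl_cons, List.filter_cons]
      by_cases h : w1 = w2
      · have hbeq : (w1 == w2) = true := by simp [h]
        have hbne : ¬((w1 != w2) = true) := by simp [h]
        rw [if_pos hbeq, if_neg hbne]
        exact ih m ans hm
      · have hbeq : ¬((w1 == w2) = true) := by simp [h]
        have hbne : (w1 != w2) = true := by simp [h]
        rw [if_neg hbeq, if_pos hbne, List.map_cons, List.foldl_cons]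
        simp only [gt_iff_lt]
        have hlen : PySem.Str.len w2 = ((w2.toList.length : Nat) : Int) := by simp
        have hacc : prefLoopA w1 w2
              (PySem.List.pyRange (min (PySem.Str.len w2) (PySem.Str.len w2)) m (-1)) (m, ans)
            = if m < overlapB w1 w2 then (overlapB w1 w2, [w1, w2]) else (m, ans) := by
          rw [min_self, hlen, overlapB_eq_ovN]
          exact prefLoopA_eq w1 w2 w2.toList.length m ans hm
        rw [hacc]
        by_cases hlt : m < overlapB w1 w2
        · rw [if_pos hlt]
          exact ih (overlapB w1 w2) [w1, w2] (overlapB_nonneg w1 w2)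
        · rw [if_neg hlt]
          exact ih m ans hm

-- B's candidate fold keeps a nonnegative first component
lemma inner_nonneg (w1 : String) (ws : List String) :
    ∀ (st : Int × List String), 0 ≤ st.1 →
      0 ≤ (((ws.filter (fun w2 => w1 != w2)).map (fun w2 => (overlapB w1 w2, [w1, w2]))).foldl
          (fun st c => if c.1 > st.1 then (c.1, c.2) else st) st).1 := by
  induction ws with
  | nil => intro st h; simpa
  | cons w2 rest ih =>
      intro st h
      by_cases hb : (w1 != w2) = true
      · rw [List.filter_cons, if_pos hb, List.map_cons, List.foldl_cons]
        simp only [gt_iff_lt]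
        by_cases hlt : st.1 < overlapB w1 w2
        · rw [if_pos hlt]
          exact ih _ (overlapB_nonneg w1 w2)
        · rw [if_neg hlt]
          exact ih st h
      · rw [List.filter_cons, if_neg hb]
        exact ih st h

lemma outer_eq (words : List String) (ws1 : List String) :
    ∀ (m : Int) (ans : List String), 0 ≤ m →
      ws1.foldl (fun st word1 =>
        words.foldl (fun st word2 =>
          if word1 == word2 then st
          else
            let min_len := st.1
            let max_len := min (PySem.Str.len word2) (PySem.Str.len word2)
            prefLoopA word1 word2 (PySem.List.pyRange max_len min_len (-1)) st) st) (m, ans)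
      = ws1.foldl (fun st w1 =>
          ((words.filter (fun w2 => w1 != w2)).map (fun w2 => (overlapB w1 w2, [w1, w2]))).foldl
            (fun st c => if c.1 > st.1 then (c.1, c.2) else st) st) (m, ans) := by
  induction ws1 with
  | nil => intro m ans hm; simp
  | cons w1 rest ih =>
      intro m ans hm
      simp only [List.foldl_cons]
      rw [inner_eq w1 words m ans hm]
      have hP := inner_nonneg w1 words (m, ans) hm
      rcases hfold : ((words.filter (fun w2 => w1 != w2)).map
            (fun w2 => (overlapB w1 w2, [w1, w2]))).foldl
          (fun st c => if c.1 > st.1 then (c.1, c.2) else st) (m, ans) with ⟨m', ans'⟩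
      rw [hfold] at hP ⊢
      exact ih m' ans' hP

lemma foldl_flatMap_eq {α β γ : Type} (l : List α) (f : α → List β) (g : γ → β → γ) (init : γ) :
    (l.flatMap f).foldl g init = l.foldl (fun acc x => (f x).foldl g acc) init := by
  induction l generalizing init with
  | nil => simp
  | cons x xs ih => simp [List.foldl_append, ih]

-- ===== VERDICT (by name: the statement is the Claim_ definition above) =====
theorem brutforce_spec : Claim_equal_brutforce := by
  intro words _hd
  unfold Spec_brutforce
  simp only [brutforce, brutforce_alt]
  rw [foldl_flatMap_eq]
  exact outer_eq words words 0 [] le_rfl
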